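-- pv_equiv track=rewrite | github.com/HarshitGupta3017/LeetCode-Daily | Find the Minimum Area to Cover All Ones II/Find the Minimum Area to Cover All Ones II.py | computeBoundingArea
-- ===== SOURCE A (Python) =====
-- from typing import List
--
-- def computeBoundingArea(rowStart: int, rowEnd: int, colStart: int, colEnd: int, grid: List[List[int]]) -> int:
--     rows, cols = len(grid), len(grid[0])
--     minRow, maxRow, minCol, maxCol = rows, -1, cols, -1
--     for r in range(rowStart, rowEnd):
--         for c in range(colStart, colEnd):
--             if grid[r][c] == 1:
--                 minRow = min(minRow, r)
--                 maxRow = max(maxRow, r)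
--                 minCol = min(minCol, c)
--                 maxCol = max(maxCol, c)
--     if maxRow == -1:
--         return 0
--     return (maxRow - minRow + 1) * (maxCol - minCol + 1)
-- ===== SOURCE B (Python) =====
-- def computeBoundingArea(rowStart, rowEnd, colStart, colEnd, grid):
--     # four independent directional first-hit scans (each stops at the first hit),
--     # instead of one full pass maintaining four running accumulators
--     def row_has_one(r):
--         return any(grid[r][c] == 1 for c in range(colStart, colEnd))
--
--     def col_has_one(c):
--         return any(grid[r][c] == 1 for r in range(rowStart, rowEnd))
--
--     minRow = next((r for r in range(rowStart, rowEnd) if row_has_one(r)), None)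
--     if minRow is None:
--         return 0
--     maxRow = next(r for r in range(rowEnd - 1, rowStart - 1, -1) if row_has_one(r))
--     minCol = next(c for c in range(colStart, colEnd) if col_has_one(c))
--     maxCol = next(c for c in range(colEnd - 1, colStart - 1, -1) if col_has_one(c))
--     return (maxRow - minRow + 1) * (maxCol - minCol + 1)
-- ===== Notes on version B (the rewrite author's own statement) =====
-- stated objective: alternative
-- what changed: Replaces A's single full pass maintaining four running min/max accumulators by four independent directional first-hit scans: minRow is the first row (scanning down) containing a 1, maxRow the first scanning up, minCol/maxCol likewise over columns, each scan stopping at its first hit.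
-- outside the precondition, e.g. on computeBoundingArea(-1, 0, 0, 1, [[1]]): A returns 0, B returns 1; on computeBoundingArea(1, 2, 2, 3, [[0], [0, 0, 1]]): A returns 2, B returns 1
import Mathlib
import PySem

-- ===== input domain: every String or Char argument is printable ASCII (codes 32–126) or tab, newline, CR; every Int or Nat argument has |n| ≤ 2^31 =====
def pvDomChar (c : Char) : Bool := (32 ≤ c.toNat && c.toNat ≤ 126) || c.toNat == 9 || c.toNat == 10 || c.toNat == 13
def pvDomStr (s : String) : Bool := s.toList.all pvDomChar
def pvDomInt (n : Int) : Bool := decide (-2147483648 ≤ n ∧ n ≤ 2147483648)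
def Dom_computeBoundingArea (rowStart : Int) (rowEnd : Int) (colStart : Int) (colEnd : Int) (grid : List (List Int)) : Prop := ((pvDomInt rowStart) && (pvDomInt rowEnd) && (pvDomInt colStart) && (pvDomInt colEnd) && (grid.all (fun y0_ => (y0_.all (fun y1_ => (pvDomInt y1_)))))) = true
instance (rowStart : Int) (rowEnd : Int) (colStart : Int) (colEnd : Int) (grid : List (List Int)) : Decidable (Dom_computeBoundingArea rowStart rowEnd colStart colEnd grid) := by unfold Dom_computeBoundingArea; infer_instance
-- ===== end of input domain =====

-- B replaces A's single accumulator pass by four independent directional first-hit scans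
-- (first/last row containing a 1, first/last column containing a 1); objective: alternative.

-- ===== PORT A =====
def computeBoundingArea (rowStart : Int) (rowEnd : Int) (colStart : Int) (colEnd : Int) (grid : List (List Int)) : Int :=
  let rows : Int := grid.length
  let cols : Int := (PySem.List.pyGetD grid 0 []).length
  let st : Int × Int × Int × Int :=
    (PySem.List.pyRange rowStart rowEnd 1).foldl (fun s r =>
      (PySem.List.pyRange colStart colEnd 1).foldl (fun t c =>
        if PySem.List.pyGetD (PySem.List.pyGetD grid r []) c 0 == 1 then
          (min t.1 r, max t.2.1 r, min t.2.2.1 c, max t.2.2.2 c)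
        else t) s)
      (rows, -1, cols, -1)
  if st.2.1 == -1 then 0
  else (st.2.1 - st.1 + 1) * (st.2.2.2 - st.2.2.1 + 1)

-- ===== PORT B =====
-- B's helper row_has_one: does row r contain a 1 in columns [colStart, colEnd)?
def pvRowHasOne (colStart : Int) (colEnd : Int) (grid : List (List Int)) (r : Int) : Bool :=
  (PySem.List.pyRange colStart colEnd 1).any
    (fun c => PySem.List.pyGetD (PySem.List.pyGetD grid r []) c 0 == 1)

-- B's helper col_has_one: does column c contain a 1 in rows [rowStart, rowEnd)?
def pvColHasOne (rowStart : Int) (rowEnd : Int) (grid : List (List Int)) (c : Int) : Bool :=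
  (PySem.List.pyRange rowStart rowEnd 1).any
    (fun r => PySem.List.pyGetD (PySem.List.pyGetD grid r []) c 0 == 1)

-- Python's bare next(...) raises StopIteration on an empty iterator; once minRow is found the
-- other three scans can never be empty (the same 1-cell is seen by all of them), so the
-- .getD defaults below are never used.
def computeBoundingArea_alt (rowStart : Int) (rowEnd : Int) (colStart : Int) (colEnd : Int) (grid : List (List Int)) : Int :=
  match (PySem.List.pyRange rowStart rowEnd 1).find? (pvRowHasOne colStart colEnd grid) with
  | none => 0
  | some minRow =>
    let maxRow : Int :=
      (((PySem.List.pyRange (rowEnd - 1) (rowStart - 1) (-1)).find?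
          (pvRowHasOne colStart colEnd grid)).getD 0)
    let minCol : Int :=
      (((PySem.List.pyRange colStart colEnd 1).find?
          (pvColHasOne rowStart rowEnd grid)).getD 0)
    let maxCol : Int :=
      (((PySem.List.pyRange (colEnd - 1) (colStart - 1) (-1)).find?
          (pvColHasOne rowStart rowEnd grid)).getD 0)
    (maxRow - minRow + 1) * (maxCol - minCol + 1)

-- ===== PRECONDITION & SPEC =====
-- Pre_ restricts to the natural domain (non-empty grid; every scanned index non-negative and in
-- range, with scanned columns within the first row's width): outside it A either raises IndexError
-- or returns a value that is an artefact of Python's negative-index wraparound or of clamping the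
-- column accumulators against len(grid[0]) on ragged grids (see cites).
def Pre_computeBoundingArea (rowStart : Int) (rowEnd : Int) (colStart : Int) (colEnd : Int) (grid : List (List Int)) : Prop :=
  grid ≠ [] ∧
  (rowEnd ≤ rowStart ∨ colEnd ≤ colStart ∨
    (0 ≤ rowStart ∧ rowEnd ≤ (grid.length : Int) ∧ 0 ≤ colStart ∧
     colEnd ≤ ((grid.headD []).length : Int) ∧
     ∀ row ∈ (grid.drop rowStart.toNat).take (rowEnd - rowStart).toNat,
       colEnd ≤ (row.length : Int)))
instance (rowStart : Int) (rowEnd : Int) (colStart : Int) (colEnd : Int) (grid : List (List Int)) : Decidable (Pre_computeBoundingArea rowStart rowEnd colStart colEnd grid) := by unfold Pre_computeBoundingArea; infer_instance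

def pvWitness_computeBoundingArea : Int × Int × Int × Int × List (List Int) := (0, 1, 0, 1, [[1]])

def Spec_computeBoundingArea (rowStart : Int) (rowEnd : Int) (colStart : Int) (colEnd : Int) (grid : List (List Int)) (out : Int) : Prop := out = computeBoundingArea_alt rowStart rowEnd colStart colEnd grid
instance (rowStart : Int) (rowEnd : Int) (colStart : Int) (colEnd : Int) (grid : List (List Int)) (out : Int) : Decidable (Spec_computeBoundingArea rowStart rowEnd colStart colEnd grid out) := by unfold Spec_computeBoundingArea; infer_instance

-- ===== CLAIM =====
def Claim_equal_computeBoundingArea : Prop := ∀ (rowStart : Int) (rowEnd : Int) (colStart : Int) (colEnd : Int) (grid : List (List Int)), Dom_computeBoundingArea rowStart rowEnd colStart colEnd grid → Pre_computeBoundingArea rowStart rowEnd colStart colEnd grid → Spec_computeBoundingArea rowStart rowEnd colStart colEnd grid (computeBoundingArea rowStart rowEnd colStart colEnd grid)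

-- ===== LEMMAS AND PROOFS =====

-- A's min/max update step, on a gathered coordinate pair.
def pvStep (t : Int × Int × Int × Int) (rc : Int × Int) : Int × Int × Int × Int :=
  (min t.1 rc.1, max t.2.1 rc.1, min t.2.2.1 rc.2, max t.2.2.2 rc.2)

lemma pv_foldl_if_filter_map {S : Type} (f : S → Int × Int → S) (p : Int → Bool) (r : Int)
    (l : List Int) (s : S) :
    l.foldl (fun t c => if p c then f t (r, c) else t) s
      = ((l.filter p).map (fun c => (r, c))).foldl f s := by
  induction l generalizing s with
  | nil => rfl
  | cons x t ih =>
    by_cases h : p x <;> simp [h, ih]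

lemma pv_foldl_flatMap {α β S : Type} (g : α → List β) (f : S → β → S) (l : List α) (s : S) :
    (l.flatMap g).foldl f s = l.foldl (fun s a => (g a).foldl f s) s := by
  induction l generalizing s with
  | nil => rfl
  | cons x t ih => simp [List.flatMap_cons, List.foldl_append, ih]

lemma pv_foldl_step (cells : List (Int × Int)) (a b c d : Int) :
    cells.foldl pvStep (a, b, c, d)
      = ((cells.map Prod.fst).foldl min a, (cells.map Prod.fst).foldl max b,
         (cells.map Prod.snd).foldl min c, (cells.map Prod.snd).foldl max d) := by
  induction cells generalizing a b c d with
  | nil => rfl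
  | cons x t ih => simp [pvStep, ih]

lemma pv_foldl_min_fix (l : List Int) (x : Int) (h : ∀ y ∈ l, x ≤ y) : l.foldl min x = x := by
  induction l with
  | nil => rfl
  | cons a t ih =>
    simp only [List.foldl_cons]
    rw [min_eq_left (h a List.mem_cons_self)]
    exact ih (fun y hy => h y (List.mem_cons_of_mem _ hy))

lemma pv_foldl_min_eq (l : List Int) (a x : Int) (hx : x ∈ l) (hle : ∀ y ∈ l, x ≤ y)
    (ha : x ≤ a) : l.foldl min a = x := by
  induction l generalizing a with
  | nil => cases hx
  | cons b t ih =>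
    simp only [List.foldl_cons]
    by_cases hbt : x ∈ t
    · exact ih (min a b) hbt (fun y hy => hle y (List.mem_cons_of_mem _ hy))
        (le_min ha (hle b List.mem_cons_self))
    · have hxb : x = b := by
        rcases List.mem_cons.mp hx with h | h
        · exact h
        · exact absurd h hbt
      subst hxb
      rw [min_eq_right ha]
      exact pv_foldl_min_fix t x (fun y hy => hle y (List.mem_cons_of_mem _ hy))

lemma pv_foldl_max_fix (l : List Int) (x : Int) (h : ∀ y ∈ l, y ≤ x) : l.foldl max x = x := by
  induction l with
  | nil => rfl
  | cons a t ih =>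
    simp only [List.foldl_cons]
    rw [max_eq_left (h a List.mem_cons_self)]
    exact ih (fun y hy => h y (List.mem_cons_of_mem _ hy))

lemma pv_foldl_max_eq (l : List Int) (a x : Int) (hx : x ∈ l) (hle : ∀ y ∈ l, y ≤ x)
    (ha : a ≤ x) : l.foldl max a = x := by
  induction l generalizing a with
  | nil => cases hx
  | cons b t ih =>
    simp only [List.foldl_cons]
    by_cases hbt : x ∈ t
    · exact ih (max a b) hbt (fun y hy => hle y (List.mem_cons_of_mem _ hy))
        (max_le ha (hle b List.mem_cons_self))
    · have hxb : x = b := by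
        rcases List.mem_cons.mp hx with h | h
        · exact h
        · exact absurd h hbt
      subst hxb
      rw [max_eq_right ha]
      exact pv_foldl_max_fix t x (fun y hy => hle y (List.mem_cons_of_mem _ hy))

-- the first element of a Pairwise-R list satisfying p is R-below every satisfying element
lemma pv_find?_min {α : Type} (R : α → α → Prop) (p : α → Bool) (l : List α) (x : α)
    (hs : l.Pairwise R) (h : l.find? p = some x) :
    ∀ y ∈ l, p y = true → x = y ∨ R x y := by
  induction l with
  | nil => simp at h
  | cons a t ih =>
    by_cases hpa : p a = true
    · rw [List.find?_cons_of_pos hpa] at h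
      injection h with h; subst h
      intro y hy hpy
      rcases List.mem_cons.mp hy with rfl | hyt
      · exact Or.inl rfl
      · exact Or.inr ((List.pairwise_cons.mp hs).1 y hyt)
    · rw [List.find?_cons_of_neg hpa] at h
      intro y hy hpy
      rcases List.mem_cons.mp hy with rfl | hyt
      · exact absurd hpy hpa
      · exact ih (List.pairwise_cons.mp hs).2 h y hyt hpy

-- ===== VERDICT =====
theorem computeBoundingArea_spec : Claim_equal_computeBoundingArea := by
  intro rowStart rowEnd colStart colEnd grid _dom pre
  obtain ⟨hne, pre2⟩ := pre
  have hbound : ∀ r ∈ PySem.List.pyRange rowStart rowEnd 1,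
      ∀ c ∈ PySem.List.pyRange colStart colEnd 1,
      0 ≤ r ∧ r < (grid.length : Int) ∧ 0 ≤ c ∧ c < ((grid.headD []).length : Int) := by
    intro r hr c hc
    rw [PySem.List.mem_pyRange_one] at hr hc
    rcases pre2 with h | h | ⟨h1, h2, h3, h4, _⟩
    · omega
    · omega
    · exact ⟨by omega, by omega, by omega, by omega⟩
  unfold Spec_computeBoundingArea computeBoundingArea computeBoundingArea_alt
  set cells : List (Int × Int) :=
    (PySem.List.pyRange rowStart rowEnd 1).flatMap (fun r =>
      ((PySem.List.pyRange colStart colEnd 1).filter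
        (fun c => PySem.List.pyGetD (PySem.List.pyGetD grid r []) c 0 == 1)).map (fun c => (r, c)))
    with hcells
  -- membership in the conceptual cell list
  have hcell_iff : ∀ r c, (r, c) ∈ cells ↔
      (r ∈ PySem.List.pyRange rowStart rowEnd 1 ∧ c ∈ PySem.List.pyRange colStart colEnd 1 ∧
        (PySem.List.pyGetD (PySem.List.pyGetD grid r []) c 0 == 1) = true) := by
    intro r c
    simp only [hcells, List.mem_flatMap, List.mem_map, List.mem_filter, Prod.mk.injEq]
    constructor
    · rintro ⟨r', hr', c', ⟨hc', hpc'⟩, rfl, rfl⟩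
      exact ⟨hr', hc', hpc'⟩
    · rintro ⟨hr, hc, hpc⟩
      exact ⟨r, hr, c, ⟨hc, hpc⟩, rfl, rfl⟩
  -- p r true iff row r contributes a cell (for r in the scanned row range)
  have hrp : ∀ r ∈ PySem.List.pyRange rowStart rowEnd 1,
      (pvRowHasOne colStart colEnd grid r = true ↔ ∃ c, (r, c) ∈ cells) := by
    intro r hr
    unfold pvRowHasOne
    rw [List.any_eq_true]
    constructor
    · rintro ⟨c, hc, hpc⟩; exact ⟨c, (hcell_iff r c).mpr ⟨hr, hc, hpc⟩⟩
    · rintro ⟨c, hc⟩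
      obtain ⟨_, hc2, hpc⟩ := (hcell_iff r c).mp hc
      exact ⟨c, hc2, hpc⟩
  have hcq : ∀ c ∈ PySem.List.pyRange colStart colEnd 1,
      (pvColHasOne rowStart rowEnd grid c = true ↔ ∃ r, (r, c) ∈ cells) := by
    intro c hc
    unfold pvColHasOne
    rw [List.any_eq_true]
    constructor
    · rintro ⟨r, hr, hpc⟩; exact ⟨r, (hcell_iff r c).mpr ⟨hr, hc, hpc⟩⟩
    · rintro ⟨r, hr⟩
      obtain ⟨hr2, _, hpc⟩ := (hcell_iff r c).mp hr
      exact ⟨r, hr2, hpc⟩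
  -- the double fold of A is the fold of pvStep over the gathered cells
  have hfold : ∀ s : Int × Int × Int × Int,
      (PySem.List.pyRange rowStart rowEnd 1).foldl (fun s r =>
        (PySem.List.pyRange colStart colEnd 1).foldl (fun t c =>
          if PySem.List.pyGetD (PySem.List.pyGetD grid r []) c 0 == 1 then
            (min t.1 r, max t.2.1 r, min t.2.2.1 c, max t.2.2.2 c)
          else t) s) s
      = cells.foldl pvStep s := by
    intro s
    have hfun : (fun (s : Int × Int × Int × Int) (r : Int) =>
        (PySem.List.pyRange colStart colEnd 1).foldl (fun t c =>
          if PySem.List.pyGetD (PySem.List.pyGetD grid r []) c 0 == 1 then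
            (min t.1 r, max t.2.1 r, min t.2.2.1 c, max t.2.2.2 c)
          else t) s)
        = (fun (s : Int × Int × Int × Int) (r : Int) =>
            (((PySem.List.pyRange colStart colEnd 1).filter
              (fun c => PySem.List.pyGetD (PySem.List.pyGetD grid r []) c 0 == 1)).map
                (fun c => (r, c))).foldl pvStep s) := by
      funext s r
      exact pv_foldl_if_filter_map pvStep _ r _ s
    rw [hfun, hcells, pv_foldl_flatMap]
  have hmem : ∀ rc ∈ cells, 0 ≤ rc.1 ∧ rc.1 < (grid.length : Int) ∧ 0 ≤ rc.2 ∧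
      rc.2 < ((grid.headD []).length : Int) := by
    rintro ⟨r, c⟩ hrc
    obtain ⟨hr, hc, _⟩ := (hcell_iff r c).mp hrc
    exact hbound r hr c hc
  cases hF : (PySem.List.pyRange rowStart rowEnd 1).find? (pvRowHasOne colStart colEnd grid) with
  | none =>
    -- no scanned row contains a 1: the cell list is empty, both sides return 0
    have hc0 : cells = [] := by
      rw [List.eq_nil_iff_forall_not_mem]
      rintro ⟨r, c⟩ hrc
      obtain ⟨hr, _, _⟩ := (hcell_iff r c).mp hrc
      have := List.find?_eq_none.mp hF r hr
      exact this ((hrp r hr).mpr ⟨c, hrc⟩)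
    simp only [hfold, hc0, List.foldl_nil]
    simp
  | some m =>
    have hpm : pvRowHasOne colStart colEnd grid m = true := List.find?_some hF
    have hmr : m ∈ PySem.List.pyRange rowStart rowEnd 1 := List.mem_of_find?_eq_some hF
    obtain ⟨c0, hmc0⟩ := (hrp m hmr).mp hpm
    -- the backward row range is the reverse of the forward one
    have hrevr : PySem.List.pyRange (rowEnd - 1) (rowStart - 1) (-1)
        = (PySem.List.pyRange rowStart rowEnd 1).reverse := by
      rw [PySem.List.pyRange_neg_one_eq_reverse]
      norm_num
    have hrevc : PySem.List.pyRange (colEnd - 1) (colStart - 1) (-1)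
        = (PySem.List.pyRange colStart colEnd 1).reverse := by
      rw [PySem.List.pyRange_neg_one_eq_reverse]
      norm_num
    -- the three other scans all succeed (the 1-cell (m, c0) is seen by each of them)
    obtain ⟨M, hM⟩ : ∃ M, ((PySem.List.pyRange rowStart rowEnd 1).reverse).find?
        (pvRowHasOne colStart colEnd grid) = some M := by
      cases h : ((PySem.List.pyRange rowStart rowEnd 1).reverse).find?
          (pvRowHasOne colStart colEnd grid) with
      | none => exact absurd hpm (List.find?_eq_none.mp h m (List.mem_reverse.mpr hmr))
      | some M => exact ⟨M, rfl⟩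
    have hqc0 : pvColHasOne rowStart rowEnd grid c0 = true :=
      (hcq c0 ((hcell_iff m c0).mp hmc0).2.1).mpr ⟨m, hmc0⟩
    have hc0r : c0 ∈ PySem.List.pyRange colStart colEnd 1 := ((hcell_iff m c0).mp hmc0).2.1
    obtain ⟨mc, hmc⟩ : ∃ mc, (PySem.List.pyRange colStart colEnd 1).find?
        (pvColHasOne rowStart rowEnd grid) = some mc := by
      cases h : (PySem.List.pyRange colStart colEnd 1).find? (pvColHasOne rowStart rowEnd grid) with
      | none => exact absurd hqc0 (List.find?_eq_none.mp h c0 hc0r)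
      | some mc => exact ⟨mc, rfl⟩
    obtain ⟨Mc, hMc⟩ : ∃ Mc, ((PySem.List.pyRange colStart colEnd 1).reverse).find?
        (pvColHasOne rowStart rowEnd grid) = some Mc := by
      cases h : ((PySem.List.pyRange colStart colEnd 1).reverse).find?
          (pvColHasOne rowStart rowEnd grid) with
      | none => exact absurd hqc0 (List.find?_eq_none.mp h c0 (List.mem_reverse.mpr hc0r))
      | some Mc => exact ⟨Mc, rfl⟩
    -- each found index is in range and satisfies its predicate
    have hMr : M ∈ PySem.List.pyRange rowStart rowEnd 1 :=
      List.mem_reverse.mp (List.mem_of_find?_eq_some hM)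
    have hpM : pvRowHasOne colStart colEnd grid M = true := List.find?_some hM
    have hmcr : mc ∈ PySem.List.pyRange colStart colEnd 1 := List.mem_of_find?_eq_some hmc
    have hqmc : pvColHasOne rowStart rowEnd grid mc = true := List.find?_some hmc
    have hMcr : Mc ∈ PySem.List.pyRange colStart colEnd 1 :=
      List.mem_reverse.mp (List.mem_of_find?_eq_some hMc)
    have hqMc : pvColHasOne rowStart rowEnd grid Mc = true := List.find?_some hMc
    obtain ⟨cM, hcM⟩ := (hrp M hMr).mp hpM
    obtain ⟨rmc, hrmc⟩ := (hcq mc hmcr).mp hqmc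
    obtain ⟨rMc, hrMc⟩ := (hcq Mc hMcr).mp hqMc
    -- extremality of the four found indices over all cells
    have hrow_min : ∀ y ∈ cells.map Prod.fst, m ≤ y := by
      intro y hy
      obtain ⟨⟨r, c⟩, hrc, rfl⟩ := List.mem_map.mp hy
      obtain ⟨hr, _, _⟩ := (hcell_iff r c).mp hrc
      rcases pv_find?_min (· < ·) _ _ m (PySem.List.pairwise_lt_pyRange_one _ _) hF r hr
        ((hrp r hr).mpr ⟨c, hrc⟩) with h | h
      · omega
      · omega
    have hrow_max : ∀ y ∈ cells.map Prod.fst, y ≤ M := by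
      intro y hy
      obtain ⟨⟨r, c⟩, hrc, rfl⟩ := List.mem_map.mp hy
      obtain ⟨hr, _, _⟩ := (hcell_iff r c).mp hrc
      have hs : ((PySem.List.pyRange rowStart rowEnd 1).reverse).Pairwise (fun a b => b < a) :=
        List.pairwise_reverse.mpr (PySem.List.pairwise_lt_pyRange_one _ _)
      rcases pv_find?_min (fun a b => b < a) _ _ M hs hM r (List.mem_reverse.mpr hr)
        ((hrp r hr).mpr ⟨c, hrc⟩) with h | h
      · omega
      · omega
    have hcol_min : ∀ y ∈ cells.map Prod.snd, mc ≤ y := by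
      intro y hy
      obtain ⟨⟨r, c⟩, hrc, rfl⟩ := List.mem_map.mp hy
      obtain ⟨_, hc, _⟩ := (hcell_iff r c).mp hrc
      rcases pv_find?_min (· < ·) _ _ mc (PySem.List.pairwise_lt_pyRange_one _ _) hmc c hc
        ((hcq c hc).mpr ⟨r, hrc⟩) with h | h
      · omega
      · omega
    have hcol_max : ∀ y ∈ cells.map Prod.snd, y ≤ Mc := by
      intro y hy
      obtain ⟨⟨r, c⟩, hrc, rfl⟩ := List.mem_map.mp hy
      obtain ⟨_, hc, _⟩ := (hcell_iff r c).mp hrc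
      have hs : ((PySem.List.pyRange colStart colEnd 1).reverse).Pairwise (fun a b => b < a) :=
        List.pairwise_reverse.mpr (PySem.List.pairwise_lt_pyRange_one _ _)
      rcases pv_find?_min (fun a b => b < a) _ _ Mc hs hMc c (List.mem_reverse.mpr hc)
        ((hcq c hc).mpr ⟨r, hrc⟩) with h | h
      · omega
      · omega
    -- the four members
    have hm_mem : m ∈ cells.map Prod.fst := List.mem_map.mpr ⟨(m, c0), hmc0, rfl⟩
    have hM_mem : M ∈ cells.map Prod.fst := List.mem_map.mpr ⟨(M, cM), hcM, rfl⟩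
    have hmc_mem : mc ∈ cells.map Prod.snd := List.mem_map.mpr ⟨(rmc, mc), hrmc, rfl⟩
    have hMc_mem : Mc ∈ cells.map Prod.snd := List.mem_map.mpr ⟨(rMc, Mc), hrMc, rfl⟩
    -- bounds for the initial accumulators
    have hmlt := hmem (m, c0) hmc0
    have hMge := hmem (M, cM) hcM
    have hmcb := hmem (rmc, mc) hrmc
    have hMcb := hmem (rMc, Mc) hrMc
    have hcols : (PySem.List.pyGetD grid 0 []).length = (grid.headD []).length := by
      cases grid with
      | nil => exact absurd rfl hne
      | cons g gs => simp [PySem.List.pyGetD]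
    -- evaluate A via the fold characterisation
    simp only [hfold, pv_foldl_step]
    have e1 : (cells.map Prod.fst).foldl min (grid.length : Int) = m :=
      pv_foldl_min_eq _ _ _ hm_mem hrow_min (le_of_lt hmlt.2.1)
    have e2 : (cells.map Prod.fst).foldl max (-1) = M :=
      pv_foldl_max_eq _ _ _ hM_mem hrow_max (by have := hMge.1; omega)
    have e3 : (cells.map Prod.snd).foldl min ((PySem.List.pyGetD grid 0 []).length : Int) = mc := by
      rw [hcols]
      exact pv_foldl_min_eq _ _ _ hmc_mem hcol_min (le_of_lt hmcb.2.2.2)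
    have e4 : (cells.map Prod.snd).foldl max (-1) = Mc :=
      pv_foldl_max_eq _ _ _ hMc_mem hcol_max (by have := hMcb.2.2.1; omega)
    have hMne : ((M : Int) == -1) = false := by
      simp only [beq_eq_false_iff_ne, ne_eq]
      have := hMge.1
      omega
    simp only [e1, e2, e3, e4, hMne, hrevr, hrevc, hM, hmc, hMc]
    simp
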